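-- pv_equiv track=rewrite | github.com/rtran015/FRU | src/test_package/test_package/mini_drive.py | signal_conversion
-- ===== SOURCE A (Python) =====
-- def signal_conversion(msg_data: int, bytes_range: int, frequency_floor: int) -> list[int]:
--     data: int = msg_data
--     temp_data: list[int] = []
--
--     #make sure the direction is correct
--     if data > 100:
--         #increment for 2's comp
--         c = 1
--         # Forward msg correction:
--         data -= 100
--         # covert controller signal to proper range (1000-100000)
--         data *= frequency_floor
--
--         #convert to byte array but also 2's compliment to reverse motor
--         for i in range(bytes_range - 1, -1, -1):
--             temp_data.append(255 - ((data >> (8*i)) & 0xff))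
--
--         for i in range(len(temp_data) - 1, - 1, -1):
--             temp_data[i] += c
--             if temp_data[i] > 255:
--                 temp_data[i] = 0
--             else:
--                 c = 0
--                 break
--     else:
--         # covert controller signal to proper range (1000-100000)
--         data *= frequency_floor
--
--         # convert signal to byte array
--         for i in range(bytes_range - 1, -1, -1):
--             temp_data.append((data >> (8*i)) & 0xff)
--
--     return temp_data
-- ===== SOURCE B (Python) =====
-- def signal_conversion(msg_data: int, bytes_range: int, frequency_floor: int) -> list[int]:
--     # Two's complement via a single arithmetic negation instead of
--     # per-byte complement plus a carry loop; one shared extraction pass.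
--     if msg_data > 100:
--         value = -((msg_data - 100) * frequency_floor)
--     else:
--         value = msg_data * frequency_floor
--     return [(value >> (8 * i)) & 0xFF for i in range(bytes_range - 1, -1, -1)]
-- ===== Notes on version B (the rewrite author's own statement) =====
-- stated objective: simpler
-- what changed: B folds the two branches into one signed value (negating arithmetically for the reverse-direction case) and extracts its bytes in a single big-endian pass, replacing A's per-byte bitwise complement followed by a separate backward ripple-carry loop.
import Mathlib
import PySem

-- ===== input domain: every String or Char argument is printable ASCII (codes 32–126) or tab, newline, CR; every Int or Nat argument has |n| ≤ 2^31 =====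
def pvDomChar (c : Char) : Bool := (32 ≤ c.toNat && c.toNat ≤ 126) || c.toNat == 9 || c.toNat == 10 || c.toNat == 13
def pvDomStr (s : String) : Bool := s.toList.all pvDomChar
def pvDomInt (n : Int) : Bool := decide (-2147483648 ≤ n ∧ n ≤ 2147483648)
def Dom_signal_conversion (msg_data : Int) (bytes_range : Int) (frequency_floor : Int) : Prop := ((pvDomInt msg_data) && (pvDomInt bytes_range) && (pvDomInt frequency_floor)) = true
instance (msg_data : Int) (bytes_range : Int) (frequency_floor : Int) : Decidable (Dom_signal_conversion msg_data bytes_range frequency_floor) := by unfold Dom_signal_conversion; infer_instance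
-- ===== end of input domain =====

-- B replaces A's per-byte complement plus ripple-carry loop by a single arithmetic
-- negation followed by one shared big-endian byte-extraction pass (objective: simpler).

-- ===== PORT A =====
-- A's second loop: walks indices from the end, adds the carry c (always 1 here) to
-- temp[i]; on overflow writes 0 and continues, otherwise stops (the bound indices
-- make getD's default unreachable).
def pvIncA (temp : List Int) (idxs : List Int) (c : Int) : List Int :=
  match idxs with
  | [] => temp
  | i :: rest =>
      if (temp.set i.toNat (temp.getD i.toNat 0 + c)).getD i.toNat 0 > 255 then
        pvIncA ((temp.set i.toNat (temp.getD i.toNat 0 + c)).set i.toNat 0) rest c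
      else temp.set i.toNat (temp.getD i.toNat 0 + c)

def signal_conversion (msg_data : Int) (bytes_range : Int) (frequency_floor : Int) : List Int :=
  let data := msg_data
  if data > 100 then
    let c : Int := 1
    let data := data - 100
    let data := data * frequency_floor
    let temp := (PySem.List.pyRange (bytes_range - 1) (-1) (-1)).foldl
      (fun acc i => acc ++ [255 - PySem.Int.band (data >>> (8 * i).toNat) 255]) []
    pvIncA temp (PySem.List.pyRange ((temp.length : Int) - 1) (-1) (-1)) c
  else
    let data := data * frequency_floor
    (PySem.List.pyRange (bytes_range - 1) (-1) (-1)).foldl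
      (fun acc i => acc ++ [PySem.Int.band (data >>> (8 * i).toNat) 255]) []

-- ===== PORT B =====
def signal_conversion_alt (msg_data : Int) (bytes_range : Int) (frequency_floor : Int) : List Int :=
  let value := if msg_data > 100 then -((msg_data - 100) * frequency_floor)
               else msg_data * frequency_floor
  (PySem.List.pyRange (bytes_range - 1) (-1) (-1)).map
    (fun i => PySem.Int.band (value >>> (8 * i).toNat) 255)

-- ===== PRECONDITION & SPEC =====
def Spec_signal_conversion (msg_data : Int) (bytes_range : Int) (frequency_floor : Int) (out : List Int) : Prop := out = signal_conversion_alt msg_data bytes_range frequency_floor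
instance (msg_data : Int) (bytes_range : Int) (frequency_floor : Int) (out : List Int) : Decidable (Spec_signal_conversion msg_data bytes_range frequency_floor out) := by unfold Spec_signal_conversion; infer_instance

-- ===== CLAIM (what is proved, stated in full; the proofs are below) =====
def Claim_equal_signal_conversion : Prop := ∀ (msg_data : Int) (bytes_range : Int) (frequency_floor : Int), Dom_signal_conversion msg_data bytes_range frequency_floor → Spec_signal_conversion msg_data bytes_range frequency_floor (signal_conversion msg_data bytes_range frequency_floor)

-- ===== LEMMAS AND PROOFS =====

-- [n-1, n-2, …, 0] : what range(bytes_range-1, -1, -1) yields for bytes_range = n ≥ 0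
def pvDescN (n : Nat) : List Int := (List.range n).map (fun k : Nat => (n : Int) - 1 - (k : Int))

-- little-endian increment with dropped final carry (functional form of A's 2nd loop)
def pvIncLE : List Int → List Int
  | [] => []
  | d :: ds => if d + 1 > 255 then 0 :: pvIncLE ds else (d + 1) :: ds

def pvByte (x : Int) (k : Nat) : Int := (x / 2 ^ (8 * k)) % 256

def pvDigits (n : Nat) (x : Int) : List Int := (List.range n).map (pvByte x)

theorem pvPyRange_desc (n : Nat) :
    PySem.List.pyRange ((n : Int) - 1) (-1) (-1) = pvDescN n := by
  unfold PySem.List.pyRange pvDescN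
  rw [if_neg (by norm_num)]
  rw [if_neg (by norm_num)]
  rcases Nat.eq_zero_or_pos n with h | h
  · subst h
    rw [if_neg (by norm_num)]
    rfl
  · rw [if_pos (by omega)]
    have hc : (((n : Int) - 1 - -1 + - -1 - 1) / - -1).toNat = n := by
      norm_num
    rw [hc]
    apply List.map_congr_left
    intro k _
    ring

theorem pvPyRange_nonpos (b : Int) (h : b ≤ 0) :
    PySem.List.pyRange (b - 1) (-1) (-1) = [] := by
  unfold PySem.List.pyRange
  norm_num
  intro h'
  omega

theorem pvBand255 (y : Int) : PySem.Int.band y 255 = y % 256 := by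
  unfold PySem.Int.band
  by_cases h : 0 ≤ y
  · rw [if_pos h, if_pos (by norm_num)]
    have h1 : y.toNat &&& (255 : Int).toNat = y.toNat % 256 := by
      have := Nat.and_two_pow_sub_one_eq_mod y.toNat 8
      norm_num at this
      simpa using this
    rw [h1]
    omega
  · rw [if_neg h, if_pos (by norm_num)]
    have h1 : (255 : Int).toNat &&& (-y - 1).toNat = (-y - 1).toNat % 256 := by
      have := Nat.and_two_pow_sub_one_eq_mod (-y - 1).toNat 8
      norm_num at this
      simpa [Nat.and_comm] using this
    rw [h1]
    omega

theorem pvByte_expr (x : Int) (k : Nat) :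
    PySem.Int.band (x >>> ((8 * k : Nat) : Int)) 255 = pvByte x k := by
  rw [pvBand255, Int.shiftRight_natCast_right, Int.shiftRight_eq_div_pow, pvByte]
  norm_cast

-- floor-division form of ~x: byte-wise this is the per-byte complement
theorem pvNegOneSub (x d : Int) (hd : 0 < d) :
    (-x - 1) / d = -(x / d) - 1 ∧ (-x - 1) % d = d - 1 - x % d := by
  have h1 : d * (x / d) + x % d = x := Int.mul_ediv_add_emod x d
  have h2 : 0 ≤ x % d := Int.emod_nonneg x (by omega)
  have h3 : x % d < d := Int.emod_lt_of_pos x hd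
  have he : -x - 1 = (d - 1 - x % d) + (-(x / d) - 1) * d := by ring_nf; omega
  constructor
  · rw [he, Int.add_mul_ediv_right _ _ (by omega : d ≠ 0),
      Int.ediv_eq_zero_of_lt (by omega) (by omega)]
    ring
  · rw [he]
    have := Int.add_mul_emod_self_left (d - 1 - x % d) d (-(x / d) - 1)
    rw [mul_comm] at this
    rw [this, Int.emod_eq_of_lt (by omega) (by omega)]

theorem pvComplByte (x : Int) (k : Nat) : 255 - pvByte x k = pvByte (-x - 1) k := by
  unfold pvByte
  have hp : (0 : Int) < 2 ^ (8 * k) := by positivity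
  rw [(pvNegOneSub x (2 ^ (8 * k)) hp).1]
  have := (pvNegOneSub (x / 2 ^ (8 * k)) 256 (by norm_num)).2
  omega

theorem pvDigits_succ (n : Nat) (x : Int) :
    pvDigits (n + 1) x = x % 256 :: pvDigits n (x / 256) := by
  unfold pvDigits
  rw [List.range_succ_eq_map, List.map_cons, List.map_map]
  congr 1
  · unfold pvByte; norm_num
  · apply List.map_congr_left
    intro k _
    unfold pvByte
    simp only [Function.comp_apply, Nat.succ_eq_add_one]
    rw [show (2 : Int) ^ (8 * (k + 1)) = 256 * 2 ^ (8 * k) by rw [mul_add, pow_add]; ring,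
      ← Int.ediv_ediv_of_nonneg (by norm_num : (0:Int) ≤ 256)]

theorem pvIncLE_digits (n : Nat) (x : Int) :
    pvIncLE (pvDigits n x) = pvDigits n (x + 1) := by
  induction n generalizing x with
  | zero => rfl
  | succ n ih =>
      rw [pvDigits_succ, pvDigits_succ]
      unfold pvIncLE
      by_cases h : x % 256 = 255
      · rw [if_pos (by omega), ih]
        have hd : (x + 1) / 256 = x / 256 + 1 := by omega
        have hm : (x + 1) % 256 = 0 := by omega
        rw [hd, hm]
      · have h2 : 0 ≤ x % 256 ∧ x % 256 < 256 := ⟨Int.emod_nonneg x (by norm_num), Int.emod_lt_of_pos x (by norm_num)⟩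
        rw [if_neg (by omega)]
        have hd : (x + 1) / 256 = x / 256 := by omega
        have hm : (x + 1) % 256 = x % 256 + 1 := by omega
        rw [hd, hm]

theorem pvMem_descN (n : Nat) (i : Int) (h : i ∈ pvDescN n) : 0 ≤ i ∧ i.toNat < n := by
  simp only [pvDescN, List.mem_map] at h
  obtain ⟨k, hk, rfl⟩ := h
  simp only [List.mem_range] at hk
  omega

theorem pvDescN_succ (n : Nat) : pvDescN (n + 1) = (n : Int) :: pvDescN n := by
  unfold pvDescN
  rw [List.range_succ_eq_map, List.map_cons, List.map_map]
  congr 1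
  · push_cast; ring
  · apply List.map_congr_left
    intro k _
    simp only [Function.comp_apply, Nat.succ_eq_add_one]
    push_cast; ring

theorem pvDescN_eq_reverse (n : Nat) :
    pvDescN n = ((List.range n).map (fun k : Nat => (k : Int))).reverse := by
  induction n with
  | zero => rfl
  | succ n ih =>
      rw [pvDescN_succ, ih, List.range_succ, List.map_append, List.reverse_append]
      rfl

theorem pvIncA_append (idxs : List Int) (M E : List Int) (c : Int)
    (h : ∀ i ∈ idxs, 0 ≤ i ∧ i.toNat < M.length) :
    pvIncA (M ++ E) idxs c = pvIncA M idxs c ++ E := by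
  induction idxs generalizing M with
  | nil => rfl
  | cons i rest ih =>
      obtain ⟨h0, hlt⟩ := h i (List.mem_cons_self ..)
      have hlt' : i.toNat < (M.set i.toNat (M.getD i.toNat 0 + c)).length := by
        simpa using hlt
      have e1 : (M ++ E).getD i.toNat 0 = M.getD i.toNat 0 :=
        List.getD_append _ _ _ _ hlt
      have e2 : (M ++ E).set i.toNat (M.getD i.toNat 0 + c)
          = M.set i.toNat (M.getD i.toNat 0 + c) ++ E := by
        rw [List.set_append, if_pos hlt]
      have e3 : (M.set i.toNat (M.getD i.toNat 0 + c) ++ E).getD i.toNat 0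
          = (M.set i.toNat (M.getD i.toNat 0 + c)).getD i.toNat 0 :=
        List.getD_append _ _ _ _ hlt'
      have e4 : (M.set i.toNat (M.getD i.toNat 0 + c) ++ E).set i.toNat 0
          = (M.set i.toNat (M.getD i.toNat 0 + c)).set i.toNat 0 ++ E := by
        rw [List.set_append, if_pos hlt']
      unfold pvIncA
      rw [e1, e2, e3, e4]
      split
      · apply ih
        intro j hj
        have := h j (List.mem_cons_of_mem _ hj)
        simpa using this
      · rfl

theorem pvIncA_desc (L : List Int) :
    pvIncA L (pvDescN L.length) 1 = (pvIncLE L.reverse).reverse := by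
  induction L using List.reverseRecOn with
  | nil => rfl
  | append_singleton M d ih =>
      rw [List.length_append, List.length_singleton, pvDescN_succ]
      unfold pvIncA
      have hget : (M ++ [d]).getD (Int.toNat M.length) 0 = d := by
        rw [List.getD_eq_getElem?_getD]
        simp
      have hset : ∀ v : Int, (M ++ [d]).set (Int.toNat M.length) v = M ++ [v] := by
        intro v
        rw [List.set_append]
        simp
      simp only [Int.toNat_natCast] at hget hset ⊢
      rw [hget, hset]
      have hget2 : (M ++ [d + 1]).getD M.length 0 = d + 1 := by
        rw [List.getD_eq_getElem?_getD]
        simp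
      rw [hget2]
      have hset2 : (M ++ [d + 1]).set M.length 0 = M ++ [(0 : Int)] := by
        rw [List.set_append]
        simp
      rw [List.reverse_append]
      simp only [List.reverse_singleton, List.singleton_append]
      unfold pvIncLE
      split
      · rw [hset2, pvIncA_append _ _ _ _ (fun i hi => pvMem_descN _ _ hi), ih]
        simp
      · simp

-- the big-endian byte list both maps produce
theorem pvIncA_desc' (L : List Int) (n : Nat) (h : L.length = n) :
    pvIncA L (pvDescN n) 1 = (pvIncLE L.reverse).reverse := by
  subst h; exact pvIncA_desc L

theorem pvMapBytes (n : Nat) (d : Int) :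
    (pvDescN n).map (fun i => PySem.Int.band (d >>> (8 * i).toNat) 255)
      = (pvDigits n d).reverse := by
  rw [pvDescN_eq_reverse, List.map_reverse, List.map_map]
  congr 1
  apply List.map_congr_left
  intro k _
  simp only [Function.comp_apply]
  have h8 : ((8 : Int) * (k : Int)).toNat = 8 * k := by omega
  rw [h8, pvByte_expr]

theorem pvMapComplBytes (n : Nat) (d : Int) :
    (pvDescN n).map (fun i => 255 - PySem.Int.band (d >>> (8 * i).toNat) 255)
      = (pvDigits n (-d - 1)).reverse := by
  rw [pvDescN_eq_reverse, List.map_reverse, List.map_map]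
  congr 1
  apply List.map_congr_left
  intro k _
  simp only [Function.comp_apply]
  have h8 : ((8 : Int) * (k : Int)).toNat = 8 * k := by omega
  rw [h8, pvByte_expr]
  push_cast
  rw [pvComplByte]

-- ===== VERDICT (by name: the statement is the Claim_ definition above) =====
theorem signal_conversion_spec : Claim_equal_signal_conversion := by
  unfold Claim_equal_signal_conversion
  intro msg_data bytes_range frequency_floor _
  unfold Spec_signal_conversion signal_conversion signal_conversion_alt
  by_cases hb : 0 < bytes_range
  · have hn : bytes_range - 1 = ((bytes_range.toNat : Int)) - 1 := by omega
    rw [hn, pvPyRange_desc]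
    by_cases hm : msg_data > 100
    · rw [if_pos hm, if_pos hm]
      simp only [PySem.List.foldl_append_singleton_eq_map, List.nil_append]
      rw [pvMapComplBytes, pvMapBytes]
      have hL : ((pvDigits bytes_range.toNat
          (-((msg_data - 100) * frequency_floor) - 1)).reverse).length
          = bytes_range.toNat := by simp [pvDigits]
      rw [hL, pvPyRange_desc, pvIncA_desc' _ _ hL, List.reverse_reverse,
        pvIncLE_digits]
      have e : -((msg_data - 100) * frequency_floor) - 1 + 1
          = -((msg_data - 100) * frequency_floor) := by ring
      rw [e]
    · rw [if_neg hm, if_neg hm]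
      simp only [PySem.List.foldl_append_singleton_eq_map, List.nil_append]
  · rw [pvPyRange_nonpos _ (by omega)]
    simp only [List.foldl_nil, List.map_nil, List.length_nil]
    split
    · rw [show ((0 : Nat) : Int) = 0 from rfl, pvPyRange_nonpos 0 (by omega)]
      rfl
    · rfl
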